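-- pv_equiv track=rewrite | github.com/zixuan-x/algorithms | codesignal/Assessments/alternatingSort.py | alternatingSort
-- ===== SOURCE A (Python) =====
-- def alternatingSort(a):
--     left, right = 0, len(a) - 1
--     flag = True
--     while left < right:
--         if flag:
--             if a[left] >= a[right]:
--                 return False
--             left += 1
--             flag = not flag
--         else:
--             if a[left] <= a[right]:
--                 return False
--             right -= 1
--             flag = not flag
--     return True
-- ===== SOURCE B (Python) =====
-- def alternatingSort(a):
--     res = []
--     f, b = 0, len(a) - 1
--     while f < b:
--         res.append(a[f])
--         res.append(a[b])
--         f += 1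
--         b -= 1
--     if f == b:
--         res.append(a[f])
--     for i in range(len(res) - 1):
--         if res[i] >= res[i + 1]:
--             return False
--     return True
-- ===== Notes on version B (the rewrite author's own statement) =====
-- stated objective: alternative
-- what changed: A checks order with a single in-place two-pointer loop that alternates the comparison direction; B first materialises the end-interleaved sequence (first, last, second, second-to-last, ...) into a list and then checks that list is strictly increasing in a separate pass.
import Mathlib
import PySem

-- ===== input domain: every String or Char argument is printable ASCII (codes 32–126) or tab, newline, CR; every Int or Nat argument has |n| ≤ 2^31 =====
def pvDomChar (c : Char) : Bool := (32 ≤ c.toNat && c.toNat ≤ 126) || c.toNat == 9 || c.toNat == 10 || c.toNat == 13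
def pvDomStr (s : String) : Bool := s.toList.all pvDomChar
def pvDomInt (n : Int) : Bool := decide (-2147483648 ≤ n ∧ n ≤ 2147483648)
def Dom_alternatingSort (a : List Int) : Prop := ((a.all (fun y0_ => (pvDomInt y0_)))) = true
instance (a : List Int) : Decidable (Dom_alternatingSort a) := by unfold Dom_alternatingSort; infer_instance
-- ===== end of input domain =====

-- B reconstructs the end-interleaved sequence and checks it is strictly increasing in a
-- second pass, instead of A's single alternating two-pointer comparison loop (objective: alternative).

-- ===== PORT A =====
-- the while loop of A: state (left, right, flag); indices are always in range when reached,
-- so pyGetD 0 is the exact value Python reads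
def altLoop (a : List Int) (left right : Int) (flag : Bool) : Bool :=
  if _h : left < right then
    if flag then
      if PySem.List.pyGetD a left 0 ≥ PySem.List.pyGetD a right 0 then false
      else altLoop a (left + 1) right (!flag)
    else
      if PySem.List.pyGetD a left 0 ≤ PySem.List.pyGetD a right 0 then false
      else altLoop a left (right - 1) (!flag)
  else true
termination_by (right - left).toNat
decreasing_by all_goals omega

def alternatingSort (a : List Int) : Bool :=
  altLoop a 0 (PySem.List.len a - 1) true

-- ===== PORT B =====
-- the while loop of B: appends a[f], a[b] while f < b, then the middle element if f == b
def buildGo (a : List Int) (f b : Int) : List Int :=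
  if _h : f < b then
    PySem.List.pyGetD a f 0 :: PySem.List.pyGetD a b 0 :: buildGo a (f + 1) (b - 1)
  else if f = b then [PySem.List.pyGetD a f 0] else []
termination_by (b - f).toNat
decreasing_by omega

-- the second pass of B: for i in range(len(res)-1): if res[i] >= res[i+1]: return False
def chk : List Int → Bool
  | x :: y :: t => if x ≥ y then false else chk (y :: t)
  | _ => true

def alternatingSort_alt (a : List Int) : Bool :=
  chk (buildGo a 0 (PySem.List.len a - 1))

-- ===== PRECONDITION & SPEC =====
def Spec_alternatingSort (a : List Int) (out : Bool) : Prop := out = alternatingSort_alt a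
instance (a : List Int) (out : Bool) : Decidable (Spec_alternatingSort a out) := by unfold Spec_alternatingSort; infer_instance

-- ===== CLAIM (what is proved, stated in full; the proofs are below) =====
def Claim_equal_alternatingSort : Prop := ∀ (a : List Int), Dom_alternatingSort a → Spec_alternatingSort a (alternatingSort a)

-- ===== LEMMAS AND PROOFS =====

-- buildGo starts with a[f] whenever f ≤ b
theorem buildGo_cons (a : List Int) (f b : Int) (h : f ≤ b) :
    ∃ t, buildGo a f b = PySem.List.pyGetD a f 0 :: t := by
  rw [buildGo]
  by_cases hlt : f < b
  · simp [hlt]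
  · have : f = b := le_antisymm h (not_lt.mp hlt)
    simp [this]

-- loop invariant: altLoop in state flag=true is chk of the remaining interleave;
-- in state flag=false the element a[b] has already been emitted but not yet compared
theorem altLoop_eq_chk (a : List Int) : ∀ (n : Nat) (f b : Int), (b - f).toNat = n → f ≤ b →
    (altLoop a f b true = chk (buildGo a f b)) ∧
    (altLoop a f b false = chk (PySem.List.pyGetD a b 0 :: buildGo a f (b - 1))) := by
  intro n
  induction n using Nat.strong_induction_on with
  | _ n ih =>
    intro f b hn hfb
    by_cases hlt : f < b
    · have ih1 := ih ((b - (f + 1)).toNat) (by omega) (f + 1) b rfl (by omega)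
      have ih2 := ih ((b - 1 - f).toNat) (by omega) f (b - 1) rfl (by omega)
      constructor
      · rw [altLoop, buildGo]
        simp only [hlt, dite_true, if_true]
        by_cases hc : PySem.List.pyGetD a f 0 ≥ PySem.List.pyGetD a b 0
        · simp [chk, hc]
        · simp only [hc, if_false, Bool.not_true, chk]
          rw [ih1.2]
      · rw [altLoop]
        simp only [hlt, dite_true, Bool.not_false, Bool.false_eq_true, if_false]
        obtain ⟨t, ht⟩ := buildGo_cons a f (b - 1) (by omega)
        rw [ht]
        by_cases hc : PySem.List.pyGetD a f 0 ≤ PySem.List.pyGetD a b 0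
        · simp [chk, hc]
        · have hc' : ¬ PySem.List.pyGetD a b 0 ≥ PySem.List.pyGetD a f 0 := by omega
          simp only [hc, if_false, chk]
          rw [← ht, ih2.1]
    · have heq : f = b := le_antisymm hfb (not_lt.mp hlt)
      subst heq
      constructor
      · rw [altLoop, buildGo]
        simp [chk]
      · rw [altLoop, buildGo]
        have h1 : ¬ f < f - 1 := by omega
        have h2 : ¬ f = f - 1 := by omega
        simp [chk, h1, h2]

-- ===== VERDICT (by name: the statement is the Claim_ definition above) =====
theorem alternatingSort_spec : Claim_equal_alternatingSort := by
  intro a _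
  unfold Spec_alternatingSort alternatingSort alternatingSort_alt
  rcases a with _ | ⟨x, rest⟩
  · rw [altLoop, buildGo]; simp [chk, PySem.List.len]
  · have hfb : (0 : Int) ≤ PySem.List.len (x :: rest) - 1 := by
      simp [PySem.List.len_eq]
    exact (altLoop_eq_chk (x :: rest) _ 0 (PySem.List.len (x :: rest) - 1) rfl hfb).1
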